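-- pv_equiv track=rewrite | github.com/anthonyouch/codingame_fall_challenge_2020 | verion_one.py | good_spell
-- ===== SOURCE A (Python) =====
-- def good_spell(spell, inven):
--     smallest_index_list = []
--     smallest_value = min(inven)
--
--     for i in range(len(inven)):
--         if inven[i] == smallest_value:
--             smallest_index_list.append(i)
--
--     for index in smallest_index_list:
--         if spell[index] > 0:
--             return True
--
--     return False
-- ===== SOURCE B (Python) =====
-- def good_spell(spell, inven):
--     # Single fused pass: maintain running minimum and whether any position
--     # holding the current minimum has a positive spell entry.
--     smallest = None
--     found = False
--     for i in range(len(inven)):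
--         v = inven[i]
--         positive = spell[i] > 0
--         if smallest is None or v < smallest:
--             smallest = v
--             found = positive
--         elif v == smallest:
--             found = found or positive
--     return found
-- ===== Notes on version B (the rewrite author's own statement) =====
-- stated objective: alternative
-- what changed: A computes min(inven), then collects all minimum indices in a list, then scans that list for a positive spell entry (three passes); B is one fused pass keeping a running minimum and a boolean that is reset when the minimum drops and or-ed when it is tied.
-- outside the precondition, e.g. on good_spell([1], [0, 0]): A returns True, B raises IndexError; on good_spell([-1], [0, 1]): A returns False, B raises IndexError
import Mathlib
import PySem

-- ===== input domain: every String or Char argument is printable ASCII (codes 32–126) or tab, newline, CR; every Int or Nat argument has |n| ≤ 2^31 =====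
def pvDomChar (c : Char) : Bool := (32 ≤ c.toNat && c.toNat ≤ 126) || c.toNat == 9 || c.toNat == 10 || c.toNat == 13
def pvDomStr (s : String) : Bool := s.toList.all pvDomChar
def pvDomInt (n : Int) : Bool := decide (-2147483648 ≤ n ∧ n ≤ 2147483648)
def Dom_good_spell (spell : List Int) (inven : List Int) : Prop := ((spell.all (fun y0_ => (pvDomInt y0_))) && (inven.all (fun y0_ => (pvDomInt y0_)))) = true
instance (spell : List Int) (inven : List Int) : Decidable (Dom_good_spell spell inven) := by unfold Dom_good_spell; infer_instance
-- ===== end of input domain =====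

-- B replaces A's three-pass min/collect/scan by one fused pass with a running minimum: an alternative decomposition, same cost.
-- Pre_ excludes empty inven (A's min raises ValueError) and spell shorter than inven (B reads spell[i] at every position and raises IndexError where A's lazy scan may still return).


-- ===== PORT A =====
-- second loop of A: scan the collected minimum indices, early return on a positive spell entry
def good_spell_scan (spell : List Int) : List Int → Bool
  | [] => false
  | idx :: rest => if 0 < PySem.List.pyGetD spell idx 0 then true else good_spell_scan spell rest

def good_spell (spell : List Int) (inven : List Int) : Bool :=
  match PySem.List.min? inven (fun y => y) with
  | none => false    -- min([]) raises ValueError in Python; excluded by Pre_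
  | some smallest_value =>
    let smallest_index_list :=
      (PySem.List.pyRange 0 (PySem.List.len inven) 1).foldl
        (fun acc i => if PySem.List.pyGetD inven i 0 == smallest_value then acc ++ [i] else acc) []
    good_spell_scan spell smallest_index_list

-- ===== PORT B =====
-- loop body of B's single pass: state = (running smallest, found flag)
def good_spell_step (spell : List Int) (inven : List Int) (st : Option Int × Bool) (i : Int) : Option Int × Bool :=
  let v := PySem.List.pyGetD inven i 0
  let positive : Bool := decide (0 < PySem.List.pyGetD spell i 0)
  match st.1 with
  | none => (some v, positive)
  | some s =>
    if v < s then (some v, positive)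
    else if v == s then (some v, st.2 || positive)
    else st

def good_spell_alt (spell : List Int) (inven : List Int) : Bool :=
  ((PySem.List.pyRange 0 (PySem.List.len inven) 1).foldl (good_spell_step spell inven) (none, false)).2

-- ===== PRECONDITION & SPEC =====
-- Pre_ excludes inven = [] (A raises ValueError) and spell shorter than inven (B raises IndexError; A may still return, lazily touching only minimum indices before the first positive one).
def Pre_good_spell (spell : List Int) (inven : List Int) : Prop :=
  inven ≠ [] ∧ inven.length ≤ spell.length
instance (spell : List Int) (inven : List Int) : Decidable (Pre_good_spell spell inven) := by
  unfold Pre_good_spell; infer_instance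

def pvWitness_good_spell : List Int × List Int := ([1], [2])

def Spec_good_spell (spell : List Int) (inven : List Int) (out : Bool) : Prop := out = good_spell_alt spell inven
instance (spell : List Int) (inven : List Int) (out : Bool) : Decidable (Spec_good_spell spell inven out) := by unfold Spec_good_spell; infer_instance

-- ===== CLAIM (what is proved, stated in full; the proofs are below) =====
def Claim_equal_good_spell : Prop := ∀ (spell : List Int) (inven : List Int), Dom_good_spell spell inven → Pre_good_spell spell inven → Spec_good_spell spell inven (good_spell spell inven)

-- ===== LEMMAS AND PROOFS =====

-- A's second loop is an `any` over the index list
theorem good_spell_scan_eq_any (spell : List Int) (l : List Int) :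
    good_spell_scan spell l = l.any (fun idx => decide (0 < PySem.List.pyGetD spell idx 0)) := by
  induction l with
  | nil => rfl
  | cons x xs ih =>
    simp only [good_spell_scan, List.any_cons, ← ih]
    by_cases h : 0 < PySem.List.pyGetD spell x 0 <;> simp [h]

-- characterization of A under Pre_
theorem good_spell_char (spell : List Int) (inven : List Int) (m : Int)
    (hmin : PySem.List.min? inven (fun y => y) = some m) :
    good_spell spell inven
      = decide (∃ j < inven.length, inven.getD j 0 = m ∧ 0 < spell.getD j 0) := by
  unfold good_spell
  rw [hmin]
  simp only [PySem.List.len_eq]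
  rw [PySem.List.foldl_append_if_eq_filter, good_spell_scan_eq_any]
  rw [PySem.List.pyRange_zero_natCast]
  rw [Bool.eq_iff_iff]
  simp only [List.nil_append, List.filter_map, List.any_map, List.any_filter, List.any_eq_true,
    List.mem_range, Function.comp_apply, PySem.List.pyGetD_natCast, Bool.and_eq_true,
    beq_iff_eq, decide_eq_true_eq]

-- B's loop invariant: after k steps the state is the running minimum of the prefix together with
-- the flag "some prefix position holding that minimum has a positive spell entry"
theorem good_spell_alt_inv (spell : List Int) (inven : List Int) (k : Nat)
    (hk1 : 1 ≤ k) (hk : k ≤ inven.length) :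
    ∃ m : Int,
      ((PySem.List.pyRange 0 (k : Int) 1).foldl (good_spell_step spell inven) (none, false))
        = (some m, decide (∃ j < k, inven.getD j 0 = m ∧ 0 < spell.getD j 0))
      ∧ (∀ j < k, m ≤ inven.getD j 0) ∧ (∃ j < k, inven.getD j 0 = m) := by
  induction k with
  | zero => omega
  | succ k ih =>
    by_cases hk0 : k = 0
    · -- first iteration
      subst hk0
      refine ⟨inven.getD 0 0, ?_, ?_, ?_⟩
      · rw [show (((0:Nat)+1 : Nat) : Int) = 0 + 1 by norm_num, PySem.List.pyRange_one_singleton]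
        simp only [List.foldl_cons, List.foldl_nil, good_spell_step, PySem.List.pyGetD_zero]
        rw [Prod.mk.injEq]
        refine ⟨rfl, ?_⟩
        rw [decide_eq_decide]
        constructor
        · intro hp; exact ⟨0, by omega, rfl, hp⟩
        · rintro ⟨j, hj, _, hp⟩
          have hj0 : j = 0 := by omega
          subst hj0; exact hp
      · intro j hj
        rw [Nat.lt_one_iff.mp hj]
      · exact ⟨0, by omega, rfl⟩
    · -- k ≥ 1: use the IH and split the range at k
      have hk1' : 1 ≤ k := by omega
      have hk' : k ≤ inven.length := by omega
      obtain ⟨m, hst, hmle, hatt⟩ := ih hk1' hk'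
      have hsplit : PySem.List.pyRange 0 ((k+1 : Nat) : Int) 1
          = PySem.List.pyRange 0 (k : Int) 1 ++ [(k : Int)] := by
        push_cast
        exact PySem.List.pyRange_one_succ_right (by positivity)
      rw [hsplit, List.foldl_append, hst]
      simp only [List.foldl_cons, List.foldl_nil, good_spell_step, PySem.List.pyGetD_natCast]
      set v := inven.getD k 0 with hv
      by_cases hlt : v < m
      · refine ⟨v, ?_, ?_, ?_⟩
        · rw [if_pos hlt, Prod.mk.injEq]
          refine ⟨rfl, ?_⟩
          rw [decide_eq_decide]
          constructor
          · intro hp; exact ⟨k, by omega, rfl, hp⟩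
          · rintro ⟨j, hj, hm2, hp⟩
            rcases Nat.lt_succ_iff_lt_or_eq.mp hj with hjk | hjk
            · exact absurd hm2 (by have := hmle j hjk; omega)
            · subst hjk; exact hp
        · intro j hj
          rcases Nat.lt_succ_iff_lt_or_eq.mp hj with hjk | hjk
          · have := hmle j hjk; omega
          · subst hjk; exact le_refl _
        · exact ⟨k, by omega, rfl⟩
      · by_cases heq : v = m
        · refine ⟨m, ?_, ?_, ?_⟩
          · rw [if_neg hlt, if_pos (show (v == m) = true from beq_iff_eq.mpr heq), Prod.mk.injEq]
            refine ⟨by rw [heq], ?_⟩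
            rw [← Bool.decide_or, decide_eq_decide]
            constructor
            · rintro (⟨j, hj, hm2, hp⟩ | hp)
              · exact ⟨j, by omega, hm2, hp⟩
              · exact ⟨k, by omega, heq, hp⟩
            · rintro ⟨j, hj, hm2, hp⟩
              rcases Nat.lt_succ_iff_lt_or_eq.mp hj with hjk | hjk
              · exact Or.inl ⟨j, hjk, hm2, hp⟩
              · subst hjk; exact Or.inr hp
          · intro j hj
            rcases Nat.lt_succ_iff_lt_or_eq.mp hj with hjk | hjk
            · exact hmle j hjk
            · subst hjk; omega
          · obtain ⟨j, hj, hm2⟩ := hatt; exact ⟨j, by omega, hm2⟩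
        · -- v > m : state unchanged
          refine ⟨m, ?_, ?_, ?_⟩
          · rw [if_neg hlt, if_neg (show ¬ (v == m) = true by simpa using heq), Prod.mk.injEq]
            refine ⟨rfl, ?_⟩
            rw [decide_eq_decide]
            constructor
            · rintro ⟨j, hj, hm2, hp⟩
              exact ⟨j, by omega, hm2, hp⟩
            · rintro ⟨j, hj, hm2, hp⟩
              rcases Nat.lt_succ_iff_lt_or_eq.mp hj with hjk | hjk
              · exact ⟨j, hjk, hm2, hp⟩
              · subst hjk; exact absurd hm2 heq
          · intro j hj
            rcases Nat.lt_succ_iff_lt_or_eq.mp hj with hjk | hjk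
            · exact hmle j hjk
            · subst hjk; omega
          · obtain ⟨j, hj, hm2⟩ := hatt; exact ⟨j, by omega, hm2⟩

-- ===== VERDICT (by name: the statement is the Claim_ definition above) =====
theorem good_spell_spec : Claim_equal_good_spell := by
  intro spell inven _ hpre
  obtain ⟨hne, _⟩ := hpre
  have hlen1 : 1 ≤ inven.length := by
    cases inven with
    | nil => exact absurd rfl hne
    | cons x xs => simp
  obtain ⟨m, hmin⟩ : ∃ m, PySem.List.min? inven (fun y => y) = some m := by
    cases h : PySem.List.min? inven (fun y => y) with
    | none => exact absurd ((PySem.List.min?_eq_none_iff inven (fun y => y)).mp h) hne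
    | some m => exact ⟨m, rfl⟩
  obtain ⟨m', hst, hmle', hatt'⟩ := good_spell_alt_inv spell inven inven.length hlen1 (le_refl _)
  -- m = m' : both are the least attained value
  have hmem : m ∈ inven := PySem.List.min?_mem hmin
  have hmle : ∀ y ∈ inven, m ≤ y := PySem.List.min?_isMin hmin
  have hmm' : m = m' := by
    obtain ⟨j, hj, hjm⟩ := hatt'
    have h1 : m ≤ m' := by
      have hmem' : inven.getD j 0 ∈ inven := by
        rw [List.getD_eq_getElem inven 0 hj]; exact List.getElem_mem hj
      have := hmle _ hmem'
      omega
    have h2 : m' ≤ m := by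
      obtain ⟨i, hi, hieq⟩ := List.mem_iff_getElem.mp hmem
      have := hmle' i hi
      rw [List.getD_eq_getElem inven 0 hi, hieq] at this
      exact this
    omega
  unfold Spec_good_spell good_spell_alt
  rw [good_spell_char spell inven m hmin]
  simp only [PySem.List.len_eq]
  rw [hst]
  rw [hmm']
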